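-- pv_equiv track=rewrite | github.com/daishuanglu/aspectnlp | aspectnlp/keyword_extractor.py | removeDuplicatesKeyword
-- ===== SOURCE A (Python) =====
-- def removeDuplicatesKeyword(input_keyword):
--
--     output_list = input_keyword.split()
--     if not output_list:
--         return input_keyword
--     if len(set(output_list)) == 1:
--         return output_list[0]
--     if len(output_list) > 2 and len(output_list) % 2 == 0:
--         temp = []
--         for i in range(0, len(output_list), 2):
--             temp.append((output_list[i], output_list[i+1]))
--         if len(set(temp)) == 1:
--             return output_list[0] + ' ' + output_list[1]
--     if len(output_list) > 3 and len(output_list) % 3 == 0: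
--         temp = []
--         for i in range(0, len(output_list), 3):
--             temp.append((output_list[i], output_list[i+1], output_list[i+2]))
--         if len(set(temp)) == 1:
--             return ' '.join([x for x in output_list[0:3]])
--     if len(output_list) > 4 and len(output_list) % 4 == 0:
--         temp = []
--         for i in range(0, len(output_list), 4):
--             temp.append((output_list[i], output_list[i+1], output_list[i+2], output_list[i+3]))
--         if len(set(temp)) == 1:
--             return ' '.join([x for x in output_list[0:4]])
--     return input_keyword
-- ===== SOURCE B (Python) =====
-- def removeDuplicatesKeyword(input_keyword):
--     tokens = input_keyword.split()
--     n = len(tokens)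
--     if n == 0:
--         return input_keyword
--     for p in (1, 2, 3, 4):
--         if n % p == 0 and (p == 1 or p < n) and tokens[p:] == tokens[:n - p]:
--             return ' '.join(tokens[:p])
--     return input_keyword
-- ===== Notes on version B (the rewrite author's own statement) =====
-- stated objective: simpler
-- what changed: Replaces the four hand-unrolled stride checks (building tuple lists and collapsing them through set()) by one loop over candidate periods p=1..4 that tests periodicity with a single shift comparison tokens[p:] == tokens[:n-p].
import Mathlib
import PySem

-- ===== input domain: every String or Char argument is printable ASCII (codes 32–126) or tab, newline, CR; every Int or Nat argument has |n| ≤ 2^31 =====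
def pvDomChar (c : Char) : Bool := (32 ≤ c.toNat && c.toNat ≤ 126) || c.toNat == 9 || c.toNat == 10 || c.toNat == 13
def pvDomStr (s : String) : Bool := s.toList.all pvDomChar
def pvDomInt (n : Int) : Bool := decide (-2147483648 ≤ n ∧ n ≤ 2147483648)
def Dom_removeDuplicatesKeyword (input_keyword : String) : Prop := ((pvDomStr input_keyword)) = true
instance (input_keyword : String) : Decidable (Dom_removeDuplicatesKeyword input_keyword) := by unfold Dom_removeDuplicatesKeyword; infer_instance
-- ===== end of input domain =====

-- B replaces A's four hand-unrolled stride checks (tuple lists collapsed through set()) by one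
-- loop over candidate periods p = 1..4 using a single shift comparison tokens[p:] == tokens[:n-p]
-- (objective: simpler).

-- ===== PORT A =====
def removeDuplicatesKeyword (input_keyword : String) : String :=
  let output_list := PySem.Str.split₀ input_keyword
  if output_list = [] then input_keyword
  else if PySem.Set.len (PySem.Set.ofList output_list) == 1 then
    PySem.List.pyGetD output_list 0 ""
  else
    let n : Int := PySem.List.len output_list
    let r2 : Option String :=
      if decide (2 < n) && (PySem.Int.mod n 2 == 0) then
        let temp := (PySem.List.pyRange 0 n 2).foldl
          (fun acc i => acc ++ [(PySem.List.pyGetD output_list i "",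
                                 PySem.List.pyGetD output_list (i+1) "")]) []
        if PySem.Set.len (PySem.Set.ofList temp) == 1 then
          -- Python's '+' on strings ported exactly as character-list append
          some (String.ofList ((PySem.List.pyGetD output_list 0 "").toList
                 ++ ' ' :: (PySem.List.pyGetD output_list 1 "").toList))
        else none
      else none
    match r2 with
    | some r => r
    | none =>
      let r3 : Option String :=
        if decide (3 < n) && (PySem.Int.mod n 3 == 0) then
          let temp := (PySem.List.pyRange 0 n 3).foldl
            (fun acc i => acc ++ [(PySem.List.pyGetD output_list i "",
                                   PySem.List.pyGetD output_list (i+1) "",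
                                   PySem.List.pyGetD output_list (i+2) "")]) []
          if PySem.Set.len (PySem.Set.ofList temp) == 1 then
            some (PySem.Str.join " " (PySem.List.slice output_list (some 0) (some 3)))
          else none
        else none
      match r3 with
      | some r => r
      | none =>
        let r4 : Option String :=
          if decide (4 < n) && (PySem.Int.mod n 4 == 0) then
            let temp := (PySem.List.pyRange 0 n 4).foldl
              (fun acc i => acc ++ [(PySem.List.pyGetD output_list i "",
                                     PySem.List.pyGetD output_list (i+1) "",
                                     PySem.List.pyGetD output_list (i+2) "",
                                     PySem.List.pyGetD output_list (i+3) "")]) []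
            if PySem.Set.len (PySem.Set.ofList temp) == 1 then
              some (PySem.Str.join " " (PySem.List.slice output_list (some 0) (some 4)))
            else none
          else none
        match r4 with
        | some r => r
        | none => input_keyword

-- ===== PORT B =====
def rdkTry (input_keyword : String) (tokens : List String) (n : Int) : List Int → String
  | [] => input_keyword
  | p :: ps =>
      if (PySem.Int.mod n p == 0) && ((p == 1) || decide (p < n)) &&
         (PySem.List.slice tokens (some p) none == PySem.List.slice tokens none (some (n - p)))
      then PySem.Str.join " " (PySem.List.slice tokens none (some p))
      else rdkTry input_keyword tokens n ps

def removeDuplicatesKeyword_alt (input_keyword : String) : String :=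
  let tokens := PySem.Str.split₀ input_keyword
  let n : Int := PySem.List.len tokens
  if n == 0 then input_keyword
  else rdkTry input_keyword tokens n [1, 2, 3, 4]

-- ===== PRECONDITION & SPEC =====
def Spec_removeDuplicatesKeyword (input_keyword : String) (out : String) : Prop := out = removeDuplicatesKeyword_alt input_keyword
instance (input_keyword : String) (out : String) : Decidable (Spec_removeDuplicatesKeyword input_keyword out) := by unfold Spec_removeDuplicatesKeyword; infer_instance

-- ===== CLAIM (what is proved, stated in full; the proofs are below) =====
def Claim_equal_removeDuplicatesKeyword : Prop := ∀ (input_keyword : String), Dom_removeDuplicatesKeyword input_keyword → Spec_removeDuplicatesKeyword input_keyword (removeDuplicatesKeyword input_keyword)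

-- ===== LEMMAS AND PROOFS =====

def AllEq {α : Type} (l : List α) : Prop := ∀ x ∈ l, ∀ y ∈ l, x = y
def Shift (p : Nat) (ts : List String) : Prop := ts.drop p = ts.take (ts.length - p)


theorem allpairs_iff_forall_eq {τ : Type} (L : List τ) (a : τ) (ha : a ∈ L) :
    AllEq L ↔ ∀ x ∈ L, x = a := by
  unfold AllEq
  constructor
  · intro h x hx; exact h x hx a ha
  · intro h x hx y hy; rw [h x hx, h y hy]

theorem setLen1 {α : Type} [BEq α] [LawfulBEq α] (l : List α) (h : l ≠ []) :
    ((PySem.Set.len (PySem.Set.ofList l) == 1) = true) ↔ AllEq l := by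
  have hlen : (PySem.Set.len (PySem.Set.ofList l) == 1) = true ↔ (PySem.Set.ofList l).length = 1 := by
    simp [PySem.Set.len]
  rw [hlen]
  constructor
  · intro h1 x hx y hy
    obtain ⟨a, ha⟩ := List.length_eq_one_iff.mp h1
    have hxa : x ∈ PySem.Set.ofList l := (PySem.Set.mem_ofList _ _).mpr hx
    have hya : y ∈ PySem.Set.ofList l := (PySem.Set.mem_ofList _ _).mpr hy
    rw [ha] at hxa hya
    simp at hxa hya; rw [hxa, hya]
  · intro hall
    obtain ⟨b, t, rfl⟩ := List.exists_cons_of_ne_nil h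
    have hmem : b ∈ PySem.Set.ofList (b :: t) := (PySem.Set.mem_ofList _ _).mpr (by simp)
    have hnd := PySem.Set.nodup_ofList (α := α) (b :: t)
    match hm : PySem.Set.ofList (b :: t) with
    | [] => rw [hm] at hmem; simp at hmem
    | [x] => rfl
    | x :: y :: r =>
      rw [hm] at hnd
      have hx : x ∈ b :: t := (PySem.Set.mem_ofList _ _).mp (by rw [hm]; simp)
      have hy : y ∈ b :: t := (PySem.Set.mem_ofList _ _).mp (by rw [hm]; simp)
      have := hall x hx y hy
      simp [this] at hnd


theorem shift_one_aux : ∀ (t : List String) (a : String),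
    (t = (a :: t).take t.length) ↔ ∀ x ∈ t, x = a := by
  intro t
  induction t with
  | nil => simp
  | cons c t' ih =>
    intro a
    have hst : (a :: c :: t').take (c :: t').length = a :: (c :: t').take t'.length := by
      simp [List.take_succ_cons]
    constructor
    · intro h
      rw [hst] at h
      obtain ⟨h1, h2⟩ := List.cons_eq_cons.mp h
      subst h1
      intro x hx
      rcases List.mem_cons.mp hx with rfl | hx'
      · rfl
      · exact (ih c).mp h2 x hx'
    · intro h
      have hca : c = a := h c (by simp)
      rw [hst, ← hca]
      have : t' = (c :: t').take t'.length := (ih c).mpr (fun x hx => by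
        rw [h x (by simp [hx]), hca])
      exact List.cons_eq_cons.mpr ⟨rfl, this⟩

theorem shift_one_iff_allEq (ts : List String) (h : ts ≠ []) : Shift 1 ts ↔ AllEq ts := by
  obtain ⟨a, t, rfl⟩ := List.exists_cons_of_ne_nil h
  unfold Shift AllEq
  simp only [List.length_cons, List.drop_one, Nat.add_sub_cancel, List.tail_cons]
  rw [shift_one_aux]
  constructor
  · intro h1 x hx y hy
    have hx' : x = a := by rcases List.mem_cons.mp hx with rfl | hx' ; rfl ; exact h1 x hx'
    have hy' : y = a := by rcases List.mem_cons.mp hy with rfl | hy' ; rfl ; exact h1 y hy'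
    rw [hx', hy']
  · intro h1 x hx
    exact h1 x (by simp [hx]) a (by simp)


theorem allEqMap_iff_shift {τ : Type} (p : Nat) (_hp : 0 < p) (f : List String → τ)
    (hf : ∀ xs ys : List String, p ≤ xs.length → p ≤ ys.length →
      (f xs = f ys ↔ xs.take p = ys.take p)) :
    ∀ (k : Nat) (ts : List String), ts.length = p * (k + 1) →
      ((∀ x ∈ (List.range (k + 1)).map (fun j => f (ts.drop (p * j))), x = f ts) ↔ Shift p ts) := by
  intro k
  induction k with
  | zero =>
    intro ts hlen
    have hlen' : ts.length = p := by simp only [Nat.zero_add, Nat.mul_one] at hlen; exact hlen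
    constructor
    · intro _
      unfold Shift
      rw [List.drop_eq_nil_of_le (by omega), show ts.length - p = 0 by omega, List.take_zero]
    · intro _ x hx
      rcases List.mem_map.mp hx with ⟨j, hj, rfl⟩
      have : j = 0 := by have := List.mem_range.mp hj; omega
      subst this
      simp
  | succ k ih =>
    intro ts hlen
    have hkey : p * (k + 1 + 1) = p + p * (k + 1) := by ring
    set r := ts.drop p with hr
    have hrlen : r.length = p * (k + 1) := by
      rw [hr, List.length_drop, hlen, hkey]; omega
    have hple : p ≤ ts.length := by rw [hlen, hkey]; exact Nat.le_add_right _ _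
    have hpler : p ≤ r.length := by rw [hrlen]; exact Nat.le_mul_of_pos_right p (by omega)
    have hdropshift : ∀ j : Nat, ts.drop (p * (j + 1)) = r.drop (p * j) := by
      intro j
      rw [hr, List.drop_drop]
      congr 1
      ring
    have lhs_iff : (∀ x ∈ (List.range (k + 1 + 1)).map (fun j => f (ts.drop (p * j))), x = f ts)
        ↔ (r.take p = ts.take p ∧ (∀ x ∈ (List.range (k + 1)).map (fun j => f (r.drop (p * j))), x = f r)) := by
      rw [List.range_succ_eq_map]
      simp only [List.forall_mem_map, List.forall_mem_cons, Nat.mul_zero, List.drop_zero,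
        true_and, Nat.succ_eq_add_one]
      constructor
      · intro h
        have hfr : f r = f ts := by
          have h0 := h 0 (by simp)
          rwa [hdropshift 0, Nat.mul_zero, List.drop_zero] at h0
        refine ⟨(hf r ts hpler hple).mp hfr, ?_⟩
        intro j hj
        rw [← hdropshift j]
        exact (h j hj).trans hfr.symm
      · rintro ⟨h1, h2⟩
        have hfr : f r = f ts := (hf r ts hpler hple).mpr h1
        intro j hj
        rw [hdropshift j]
        exact (h2 j hj).trans hfr
    rw [lhs_iff, ih r hrlen]
    unfold Shift
    have hts : ts = ts.take p ++ r := by rw [hr]; exact (List.take_append_drop p ts).symm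
    have hlen2 : ts.length - p = r.length := by omega
    have htklen : (ts.take p).length = p := by simp [hple]
    rw [show ts.drop p = r from hr.symm, hlen2]
    constructor
    · rintro ⟨h1, h2⟩
      conv_rhs => rw [hts]
      rw [List.take_append, List.take_of_length_le (by omega), htklen]
      conv_lhs => rw [← List.take_append_drop p r]
      rw [h1, h2]
    · intro h
      conv_rhs at h => rw [hts]
      rw [List.take_append, List.take_of_length_le (by omega), htklen] at h
      constructor
      · conv_lhs => rw [h]
        rw [List.take_append, List.take_of_length_le (by omega), htklen]
        simp
      · conv_lhs => rw [h]
        rw [List.drop_append, List.drop_of_length_le (by omega), htklen]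
        simp


def rdkF2 (l : List String) : String × String :=
  (PySem.List.pyGetD l 0 "", PySem.List.pyGetD l 1 "")
def rdkF3 (l : List String) : String × String × String :=
  (PySem.List.pyGetD l 0 "", PySem.List.pyGetD l 1 "", PySem.List.pyGetD l 2 "")
def rdkF4 (l : List String) : String × String × String × String :=
  (PySem.List.pyGetD l 0 "", PySem.List.pyGetD l 1 "", PySem.List.pyGetD l 2 "", PySem.List.pyGetD l 3 "")

theorem pyGetD_dropN {α : Type} (xs : List α) (m : Nat) (i : Int) (hi : 0 ≤ i) (d : α) :
    PySem.List.pyGetD (xs.drop m) i d = PySem.List.pyGetD xs ((m : Int) + i) d := by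
  rw [PySem.List.pyGetD_of_nonneg _ _ hi, PySem.List.pyGetD_of_nonneg _ _ (by omega)]
  have h2 : ((m : Int) + i).toNat = m + i.toNat := by omega
  rw [h2]
  simp [List.getD, List.getElem?_drop]

theorem hf2 : ∀ xs ys : List String, 2 ≤ xs.length → 2 ≤ ys.length →
    (rdkF2 xs = rdkF2 ys ↔ xs.take 2 = ys.take 2) := by
  intro xs ys hx hy
  match xs, ys with
  | a :: b :: xs', c :: d :: ys' =>
    simp [rdkF2, PySem.List.pyGetD_of_nonneg, List.getD]
  | [], _ => simp at hx
  | [_], _ => simp at hx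
  | _ :: _ :: _, [] => simp at hy
  | _ :: _ :: _, [_] => simp at hy

theorem flatMap_single {α β : Type} (g : α → β) (l : List α) :
    l.flatMap (fun a => [g a]) = l.map g := by
  induction l with
  | nil => rfl
  | cons a t ih => simp [List.flatMap_cons, ih]

theorem temp2_eq (ts : List String) (k : Nat) (hlen : ts.length = 2 * (k + 1)) :
    (PySem.List.pyRange 0 (PySem.List.len ts) 2).foldl
      (fun acc i => acc ++ [(PySem.List.pyGetD ts i "", PySem.List.pyGetD ts (i+1) "")]) []
    = (List.range (k + 1)).map (fun j => rdkF2 (ts.drop (2 * j))) := by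
  rw [PySem.List.foldl_append_eq_flatMap]
  rw [PySem.List.pyRange_of_pos _ _ (by omega)]
  have hN : PySem.List.len ts = (2 * (k + 1) : Int) := by simp [hlen]
  rw [hN]
  have hcount : (if (0:Int) < 2 * (k+1) then (((2 * (k+1) : Int) - 0 + 2 - 1) / 2).toNat else 0) = k + 1 := by
    rw [if_pos (by positivity)]
    omega
  rw [hcount]
  rw [List.flatMap_map]
  simp only [List.nil_append]
  rw [flatMap_single]
  apply List.map_congr_left
  intro j hj
  unfold rdkF2
  rw [pyGetD_dropN ts (2*j) 0 (by norm_num), pyGetD_dropN ts (2*j) 1 (by norm_num)]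
  simp only [Prod.mk.injEq]
  constructor <;> (congr 1 ; push_cast ; ring)

theorem hf3 : ∀ xs ys : List String, 3 ≤ xs.length → 3 ≤ ys.length →
    (rdkF3 xs = rdkF3 ys ↔ xs.take 3 = ys.take 3) := by
  intro xs ys hx hy
  match xs, ys with
  | a :: b :: c :: xs', d :: e :: f :: ys' =>
    simp [rdkF3, PySem.List.pyGetD_of_nonneg, List.getD]
  | [], _ => simp at hx
  | [_], _ => simp at hx
  | [_, _], _ => simp at hx
  | _ :: _ :: _ :: _, [] => simp at hy
  | _ :: _ :: _ :: _, [_] => simp at hy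
  | _ :: _ :: _ :: _, [_, _] => simp at hy

theorem hf4 : ∀ xs ys : List String, 4 ≤ xs.length → 4 ≤ ys.length →
    (rdkF4 xs = rdkF4 ys ↔ xs.take 4 = ys.take 4) := by
  intro xs ys hx hy
  match xs, ys with
  | a :: b :: c :: d :: xs', e :: f :: g :: h :: ys' =>
    simp [rdkF4, PySem.List.pyGetD_of_nonneg, List.getD]
  | [], _ => simp at hx
  | [_], _ => simp at hx
  | [_, _], _ => simp at hx
  | [_, _, _], _ => simp at hx
  | _ :: _ :: _ :: _ :: _, [] => simp at hy
  | _ :: _ :: _ :: _ :: _, [_] => simp at hy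
  | _ :: _ :: _ :: _ :: _, [_, _] => simp at hy
  | _ :: _ :: _ :: _ :: _, [_, _, _] => simp at hy

theorem temp3_eq (ts : List String) (k : Nat) (hlen : ts.length = 3 * (k + 1)) :
    (PySem.List.pyRange 0 (PySem.List.len ts) 3).foldl
      (fun acc i => acc ++ [(PySem.List.pyGetD ts i "", PySem.List.pyGetD ts (i+1) "",
                             PySem.List.pyGetD ts (i+2) "")]) []
    = (List.range (k + 1)).map (fun j => rdkF3 (ts.drop (3 * j))) := by
  rw [PySem.List.foldl_append_eq_flatMap]
  rw [PySem.List.pyRange_of_pos _ _ (by omega : (0:Int) < 3)]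
  have hN : PySem.List.len ts = (3 * (k + 1) : Int) := by simp [hlen]
  rw [hN]
  have hcount : (if (0:Int) < 3 * (k+1) then (((3 * (k+1) : Int) - 0 + 3 - 1) / 3).toNat else 0) = k + 1 := by
    rw [if_pos (by positivity)]
    omega
  rw [hcount]
  rw [List.flatMap_map]
  simp only [List.nil_append]
  rw [flatMap_single]
  apply List.map_congr_left
  intro j hj
  unfold rdkF3
  rw [pyGetD_dropN ts (3*j) 0 (by norm_num), pyGetD_dropN ts (3*j) 1 (by norm_num),
      pyGetD_dropN ts (3*j) 2 (by norm_num)]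
  simp only [Prod.mk.injEq]
  refine ⟨?_, ?_, ?_⟩ <;> (congr 1 ; push_cast ; ring)

theorem temp4_eq (ts : List String) (k : Nat) (hlen : ts.length = 4 * (k + 1)) :
    (PySem.List.pyRange 0 (PySem.List.len ts) 4).foldl
      (fun acc i => acc ++ [(PySem.List.pyGetD ts i "", PySem.List.pyGetD ts (i+1) "",
                             PySem.List.pyGetD ts (i+2) "", PySem.List.pyGetD ts (i+3) "")]) []
    = (List.range (k + 1)).map (fun j => rdkF4 (ts.drop (4 * j))) := by
  rw [PySem.List.foldl_append_eq_flatMap]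
  rw [PySem.List.pyRange_of_pos _ _ (by omega : (0:Int) < 4)]
  have hN : PySem.List.len ts = (4 * (k + 1) : Int) := by simp [hlen]
  rw [hN]
  have hcount : (if (0:Int) < 4 * (k+1) then (((4 * (k+1) : Int) - 0 + 4 - 1) / 4).toNat else 0) = k + 1 := by
    rw [if_pos (by positivity)]
    omega
  rw [hcount]
  rw [List.flatMap_map]
  simp only [List.nil_append]
  rw [flatMap_single]
  apply List.map_congr_left
  intro j hj
  unfold rdkF4
  rw [pyGetD_dropN ts (4*j) 0 (by norm_num), pyGetD_dropN ts (4*j) 1 (by norm_num),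
      pyGetD_dropN ts (4*j) 2 (by norm_num), pyGetD_dropN ts (4*j) 3 (by norm_num)]
  simp only [Prod.mk.injEq]
  refine ⟨?_, ?_, ?_, ?_⟩ <;> (congr 1 ; push_cast ; ring)

theorem out1_eq (ts : List String) (h : ts ≠ []) :
    PySem.List.pyGetD ts 0 "" = PySem.Str.join " " (PySem.List.slice ts none (some 1)) := by
  obtain ⟨a, t, rfl⟩ := List.exists_cons_of_ne_nil h
  rw [PySem.List.slice_to _ (by norm_num)]
  simp only [Int.toNat_one, List.take_succ_cons, List.take_zero]
  rw [PySem.List.pyGetD_of_nonneg _ _ le_rfl]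
  apply String.toList_inj.mp
  rw [PySem.Str.toList_join]
  simp [PySem.Chars.join_singleton, List.getD]

theorem out2_eq (ts : List String) (h : 2 ≤ ts.length) :
    String.ofList ((PySem.List.pyGetD ts 0 "").toList ++ ' ' :: (PySem.List.pyGetD ts 1 "").toList)
      = PySem.Str.join " " (PySem.List.slice ts none (some 2)) := by
  match ts, h with
  | a :: b :: t, _ =>
    rw [PySem.List.slice_to _ (by norm_num)]
    rw [PySem.List.pyGetD_of_nonneg _ _ (by norm_num), PySem.List.pyGetD_of_nonneg _ _ (by norm_num)]
    apply String.toList_inj.mp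
    rw [PySem.Str.toList_join]
    simp only [show ((2:Int)).toNat = 2 from rfl, List.take_succ_cons, List.take_zero, List.getD]
    simp [PySem.Chars.join_cons_cons, PySem.Chars.join_singleton]

theorem out34_eq (ts : List String) (p : Int) :
    PySem.Str.join " " (PySem.List.slice ts (some 0) (some p))
      = PySem.Str.join " " (PySem.List.slice ts none (some p)) := by
  rw [PySem.List.slice_zero_start]


-- stage lemmas: A's set-collapse test on the stride-p tuple list says exactly "period p"
theorem stage2_iff (ts : List String) (k : Nat) (hlen : ts.length = 2 * (k + 1)) :
    ((PySem.Set.len (PySem.Set.ofList ((PySem.List.pyRange 0 (PySem.List.len ts) 2).foldl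
      (fun acc i => acc ++ [(PySem.List.pyGetD ts i "", PySem.List.pyGetD ts (i+1) "")]) [])) == 1) = true)
      ↔ Shift 2 ts := by
  rw [temp2_eq ts k hlen]
  rw [setLen1 _ (by simp)]
  rw [allpairs_iff_forall_eq _ (rdkF2 ts) (List.mem_map.mpr ⟨0, by simp⟩)]
  exact allEqMap_iff_shift 2 (by norm_num) rdkF2 hf2 k ts hlen

theorem stage3_iff (ts : List String) (k : Nat) (hlen : ts.length = 3 * (k + 1)) :
    ((PySem.Set.len (PySem.Set.ofList ((PySem.List.pyRange 0 (PySem.List.len ts) 3).foldl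
      (fun acc i => acc ++ [(PySem.List.pyGetD ts i "", PySem.List.pyGetD ts (i+1) "",
                             PySem.List.pyGetD ts (i+2) "")]) [])) == 1) = true)
      ↔ Shift 3 ts := by
  rw [temp3_eq ts k hlen]
  rw [setLen1 _ (by simp)]
  rw [allpairs_iff_forall_eq _ (rdkF3 ts) (List.mem_map.mpr ⟨0, by simp⟩)]
  exact allEqMap_iff_shift 3 (by norm_num) rdkF3 hf3 k ts hlen

theorem stage4_iff (ts : List String) (k : Nat) (hlen : ts.length = 4 * (k + 1)) :
    ((PySem.Set.len (PySem.Set.ofList ((PySem.List.pyRange 0 (PySem.List.len ts) 4).foldl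
      (fun acc i => acc ++ [(PySem.List.pyGetD ts i "", PySem.List.pyGetD ts (i+1) "",
                             PySem.List.pyGetD ts (i+2) "", PySem.List.pyGetD ts (i+3) "")]) [])) == 1) = true)
      ↔ Shift 4 ts := by
  rw [temp4_eq ts k hlen]
  rw [setLen1 _ (by simp)]
  rw [allpairs_iff_forall_eq _ (rdkF4 ts) (List.mem_map.mpr ⟨0, by simp⟩)]
  exact allEqMap_iff_shift 4 (by norm_num) rdkF4 hf4 k ts hlen

-- B's slice test is exactly "period p"
theorem bcond_iff (ts : List String) (pI : Int) (pN : Nat) (hc : pI = (pN : Int)) (hple : pN ≤ ts.length) :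
    ((PySem.List.slice ts (some pI) none == PySem.List.slice ts none (some (PySem.List.len ts - pI))) = true)
      ↔ Shift pN ts := by
  subst hc
  rw [beq_iff_eq]
  rw [PySem.List.slice_from _ (by positivity)]
  have hlen : PySem.List.len ts = (ts.length : Int) := by simp
  rw [hlen]
  rw [PySem.List.slice_to _ (by omega)]
  unfold Shift
  rw [show ((pN : Int)).toNat = pN by omega, show ((ts.length : Int) - (pN : Int)).toNat = ts.length - pN by omega]


-- condition bridges between the ports' Bool tests and Shift
theorem guardA_iff (ts : List String) (pI : Int) (pN : Nat) (hc : pI = (pN : Int)) :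
    ((decide (pI < PySem.List.len ts) && (PySem.Int.mod (PySem.List.len ts) pI == 0)) = true)
      ↔ (pN < ts.length ∧ pN ∣ ts.length) := by
  subst hc
  have hlen : PySem.List.len ts = (ts.length : Int) := by simp
  rw [Bool.and_eq_true, decide_eq_true_iff, beq_iff_eq, hlen, PySem.Int.mod_eq_zero_iff_dvd]
  constructor
  · rintro ⟨h1, h2⟩
    exact ⟨by omega, Int.natCast_dvd_natCast.mp h2⟩
  · rintro ⟨h1, h2⟩
    exact ⟨by omega, Int.natCast_dvd_natCast.mpr h2⟩

theorem bstage1_iff (ts : List String) (h : ts ≠ []) :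
    (((PySem.Int.mod (PySem.List.len ts) 1 == 0) && (((1:Int) == 1) || decide ((1:Int) < PySem.List.len ts)) &&
      (PySem.List.slice ts (some 1) none == PySem.List.slice ts none (some (PySem.List.len ts - 1)))) = true)
      ↔ Shift 1 ts := by
  have hn : 0 < ts.length := List.length_pos_of_ne_nil h
  have h1 : (PySem.Int.mod (PySem.List.len ts) 1 == 0) = true := by
    rw [beq_iff_eq, PySem.Int.mod_eq_zero_iff_dvd]
    exact one_dvd _
  rw [Bool.and_eq_true, Bool.and_eq_true, h1]
  rw [bcond_iff ts 1 1 (by norm_num) (by omega)]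
  simp

theorem bstage_iff (ts : List String) (pI : Int) (pN : Nat) (hc : pI = (pN : Int)) (h2 : 2 ≤ pI) :
    (((PySem.Int.mod (PySem.List.len ts) pI == 0) && ((pI == 1) || decide (pI < PySem.List.len ts)) &&
      (PySem.List.slice ts (some pI) none == PySem.List.slice ts none (some (PySem.List.len ts - pI)))) = true)
      ↔ (pN < ts.length ∧ pN ∣ ts.length ∧ Shift pN ts) := by
  have hlen : PySem.List.len ts = (ts.length : Int) := by simp
  have hne1 : (pI == 1) = false := by rw [beq_eq_false_iff_ne]; omega
  rw [Bool.and_eq_true, Bool.and_eq_true, Bool.or_eq_true, hne1]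
  rw [beq_iff_eq, hlen, PySem.Int.mod_eq_zero_iff_dvd]
  constructor
  · rintro ⟨⟨hmod, hor⟩, hslice⟩
    have hlt : pN < ts.length := by
      rcases hor with h | h
      · simp at h
      · rw [decide_eq_true_iff] at h; omega
    have hdvd : pN ∣ ts.length := by
      rw [hc] at hmod; exact Int.natCast_dvd_natCast.mp hmod
    refine ⟨hlt, hdvd, ?_⟩
    rw [← hlen] at hslice
    exact (bcond_iff ts pI pN hc (by omega)).mp hslice
  · rintro ⟨hlt, hdvd, hshift⟩
    refine ⟨⟨?_, Or.inr ?_⟩, ?_⟩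
    · rw [hc]; exact Int.natCast_dvd_natCast.mpr hdvd
    · rw [decide_eq_true_iff]; omega
    · rw [← hlen] at *
      exact (bcond_iff ts pI pN hc (by omega)).mpr hshift

-- A's whole stride-p block as a function of (guard ∧ period-p)
theorem stageA2_some (ts : List String) (h : 2 < ts.length ∧ 2 ∣ ts.length ∧ Shift 2 ts) :
    (if (decide ((2:Int) < PySem.List.len ts) && (PySem.Int.mod (PySem.List.len ts) 2 == 0)) = true then
       if ((PySem.Set.ofList (List.foldl (fun acc i => acc ++ [(PySem.List.pyGetD ts i "", PySem.List.pyGetD ts (i+1) "")]) [] (PySem.List.pyRange 0 (PySem.List.len ts) 2))).len == 1) = true then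
         some (String.ofList ((PySem.List.pyGetD ts 0 "").toList ++ ' ' :: (PySem.List.pyGetD ts 1 "").toList))
       else none
     else none)
    = some (String.ofList ((PySem.List.pyGetD ts 0 "").toList ++ ' ' :: (PySem.List.pyGetD ts 1 "").toList)) := by
  obtain ⟨hlt, hdvd, hs⟩ := h
  rw [if_pos ((guardA_iff ts 2 2 (by norm_num)).mpr ⟨hlt, hdvd⟩)]
  obtain ⟨m, hm⟩ := hdvd
  rw [if_pos ((stage2_iff ts (m - 1) (by omega)).mpr hs)]

theorem stageA2_none (ts : List String) (h : ¬(2 < ts.length ∧ 2 ∣ ts.length ∧ Shift 2 ts)) :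
    (if (decide ((2:Int) < PySem.List.len ts) && (PySem.Int.mod (PySem.List.len ts) 2 == 0)) = true then
       if ((PySem.Set.ofList (List.foldl (fun acc i => acc ++ [(PySem.List.pyGetD ts i "", PySem.List.pyGetD ts (i+1) "")]) [] (PySem.List.pyRange 0 (PySem.List.len ts) 2))).len == 1) = true then
         some (String.ofList ((PySem.List.pyGetD ts 0 "").toList ++ ' ' :: (PySem.List.pyGetD ts 1 "").toList))
       else none
     else none) = none := by
  split_ifs with hg ht
  · exfalso
    apply h
    have hga := (guardA_iff ts 2 2 (by norm_num)).mp hg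
    obtain ⟨m, hm⟩ := hga.2
    exact ⟨hga.1, hga.2, (stage2_iff ts (m - 1) (by omega)).mp ht⟩
  · rfl
  · rfl

theorem stageA3_some (ts : List String) (h : 3 < ts.length ∧ 3 ∣ ts.length ∧ Shift 3 ts) :
    (if (decide ((3:Int) < PySem.List.len ts) && (PySem.Int.mod (PySem.List.len ts) 3 == 0)) = true then
       if ((PySem.Set.ofList (List.foldl (fun acc i => acc ++ [(PySem.List.pyGetD ts i "", PySem.List.pyGetD ts (i+1) "", PySem.List.pyGetD ts (i+2) "")]) [] (PySem.List.pyRange 0 (PySem.List.len ts) 3))).len == 1) = true then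
         some (PySem.Str.join " " (PySem.List.slice ts (some 0) (some 3)))
       else none
     else none)
    = some (PySem.Str.join " " (PySem.List.slice ts (some 0) (some 3))) := by
  obtain ⟨hlt, hdvd, hs⟩ := h
  rw [if_pos ((guardA_iff ts 3 3 (by norm_num)).mpr ⟨hlt, hdvd⟩)]
  obtain ⟨m, hm⟩ := hdvd
  rw [if_pos ((stage3_iff ts (m - 1) (by omega)).mpr hs)]

theorem stageA3_none (ts : List String) (h : ¬(3 < ts.length ∧ 3 ∣ ts.length ∧ Shift 3 ts)) :
    (if (decide ((3:Int) < PySem.List.len ts) && (PySem.Int.mod (PySem.List.len ts) 3 == 0)) = true then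
       if ((PySem.Set.ofList (List.foldl (fun acc i => acc ++ [(PySem.List.pyGetD ts i "", PySem.List.pyGetD ts (i+1) "", PySem.List.pyGetD ts (i+2) "")]) [] (PySem.List.pyRange 0 (PySem.List.len ts) 3))).len == 1) = true then
         some (PySem.Str.join " " (PySem.List.slice ts (some 0) (some 3)))
       else none
     else none) = none := by
  split_ifs with hg ht
  · exfalso
    apply h
    have hga := (guardA_iff ts 3 3 (by norm_num)).mp hg
    obtain ⟨m, hm⟩ := hga.2
    exact ⟨hga.1, hga.2, (stage3_iff ts (m - 1) (by omega)).mp ht⟩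
  · rfl
  · rfl

theorem stageA4_some (ts : List String) (h : 4 < ts.length ∧ 4 ∣ ts.length ∧ Shift 4 ts) :
    (if (decide ((4:Int) < PySem.List.len ts) && (PySem.Int.mod (PySem.List.len ts) 4 == 0)) = true then
       if ((PySem.Set.ofList (List.foldl (fun acc i => acc ++ [(PySem.List.pyGetD ts i "", PySem.List.pyGetD ts (i+1) "", PySem.List.pyGetD ts (i+2) "", PySem.List.pyGetD ts (i+3) "")]) [] (PySem.List.pyRange 0 (PySem.List.len ts) 4))).len == 1) = true then
         some (PySem.Str.join " " (PySem.List.slice ts (some 0) (some 4)))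
       else none
     else none)
    = some (PySem.Str.join " " (PySem.List.slice ts (some 0) (some 4))) := by
  obtain ⟨hlt, hdvd, hs⟩ := h
  rw [if_pos ((guardA_iff ts 4 4 (by norm_num)).mpr ⟨hlt, hdvd⟩)]
  obtain ⟨m, hm⟩ := hdvd
  rw [if_pos ((stage4_iff ts (m - 1) (by omega)).mpr hs)]

theorem stageA4_none (ts : List String) (h : ¬(4 < ts.length ∧ 4 ∣ ts.length ∧ Shift 4 ts)) :
    (if (decide ((4:Int) < PySem.List.len ts) && (PySem.Int.mod (PySem.List.len ts) 4 == 0)) = true then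
       if ((PySem.Set.ofList (List.foldl (fun acc i => acc ++ [(PySem.List.pyGetD ts i "", PySem.List.pyGetD ts (i+1) "", PySem.List.pyGetD ts (i+2) "", PySem.List.pyGetD ts (i+3) "")]) [] (PySem.List.pyRange 0 (PySem.List.len ts) 4))).len == 1) = true then
         some (PySem.Str.join " " (PySem.List.slice ts (some 0) (some 4)))
       else none
     else none) = none := by
  split_ifs with hg ht
  · exfalso
    apply h
    have hga := (guardA_iff ts 4 4 (by norm_num)).mp hg
    obtain ⟨m, hm⟩ := hga.2
    exact ⟨hga.1, hga.2, (stage4_iff ts (m - 1) (by omega)).mp ht⟩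
  · rfl
  · rfl

-- ===== VERDICT (by name: the statement is the Claim_ definition above) =====
theorem removeDuplicatesKeyword_spec : Claim_equal_removeDuplicatesKeyword := by
  intro s _
  unfold Spec_removeDuplicatesKeyword
  simp only [removeDuplicatesKeyword, removeDuplicatesKeyword_alt]
  generalize hts : PySem.Str.split₀ s = ts
  by_cases hnil : ts = []
  · simp [hnil]
  · have hn : 0 < ts.length := List.length_pos_of_ne_nil hnil
    rw [if_neg hnil]
    rw [if_neg (show ¬((PySem.List.len ts == 0) = true) by
      rw [beq_iff_eq]
      simp only [PySem.List.len_eq]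
      omega)]
    simp only [rdkTry]
    have hA1 : ((PySem.Set.ofList ts).len == 1) = true ↔ Shift 1 ts :=
      (setLen1 ts hnil).trans (shift_one_iff_allEq ts hnil).symm
    by_cases h1 : Shift 1 ts
    · rw [if_pos (hA1.mpr h1), if_pos ((bstage1_iff ts hnil).mpr h1)]
      exact out1_eq ts hnil
    · rw [if_neg (fun hc => h1 (hA1.mp hc)), if_neg (fun hc => h1 ((bstage1_iff ts hnil).mp hc))]
      by_cases f2 : 2 < ts.length ∧ 2 ∣ ts.length ∧ Shift 2 ts
      · rw [stageA2_some ts f2, if_pos ((bstage_iff ts 2 2 (by norm_num) (by norm_num)).mpr f2)]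
        exact out2_eq ts (by omega)
      · rw [stageA2_none ts f2, if_neg (fun hc => f2 ((bstage_iff ts 2 2 (by norm_num) (by norm_num)).mp hc))]
        by_cases f3 : 3 < ts.length ∧ 3 ∣ ts.length ∧ Shift 3 ts
        · rw [stageA3_some ts f3, if_pos ((bstage_iff ts 3 3 (by norm_num) (by norm_num)).mpr f3)]
          exact out34_eq ts 3
        · rw [stageA3_none ts f3, if_neg (fun hc => f3 ((bstage_iff ts 3 3 (by norm_num) (by norm_num)).mp hc))]
          by_cases f4 : 4 < ts.length ∧ 4 ∣ ts.length ∧ Shift 4 ts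
          · rw [stageA4_some ts f4, if_pos ((bstage_iff ts 4 4 (by norm_num) (by norm_num)).mpr f4)]
            exact out34_eq ts 4
          · rw [stageA4_none ts f4, if_neg (fun hc => f4 ((bstage_iff ts 4 4 (by norm_num) (by norm_num)).mp hc))]
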